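-- pv_equiv track=rewrite | github.com/joeytzt/AB1-Batch-Annotator | app.py | find_prots
-- ===== SOURCE A (Python) =====
-- def find_prots(dictionary):
--     prots_dict = {}
--     for key, frames in dictionary.items():
--         poss_protein = []
--         for f in frames:
--             poss_protein += oframe(frames[f])
--         best = ""
--         max_len = 0
--         for prot in poss_protein:
--             if len(prot) > max_len:
--                 best = prot
--                 max_len = len(prot)
--         prots_dict[key] = best
--     return prots_dict
--
-- def oframe(amino):
--     oframes = []
--     for i in range(len(amino)):
--         if amino[i] == 'M':
--             temp = amino[i:]
--             stop = temp.find('_')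
--             if stop != -1:
--                 oframes.append(temp[:stop+1])
--             else:
--                 oframes.append(temp)
--     return oframes
-- ===== SOURCE B (Python) =====
-- def find_prots(dictionary):
--     prots_dict = {}
--     for key, frames in dictionary.items():
--         best = ""
--         for amino in frames.values():
--             cur = ""  # candidate of the current stop-delimited segment (from its first M)
--             for c in amino:
--                 if cur:
--                     cur += c
--                 elif c == 'M':
--                     cur = "M"
--                 if c == '_':
--                     if len(cur) > len(best):
--                         best = cur
--                     cur = ""
--             if len(cur) > len(best):
--                 best = cur
--         prots_dict[key] = best
--     return prots_dict
-- ===== Notes on version B (the rewrite author's own statement) =====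
-- stated objective: alternative
-- what changed: A slices the remaining string at every 'M' and re-searches each slice for '_', collecting all candidate proteins before a separate max-length pass; B makes a single left-to-right scan per string, growing the current stop-delimited segment's candidate incrementally and keeping only the running best.
import Mathlib
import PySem

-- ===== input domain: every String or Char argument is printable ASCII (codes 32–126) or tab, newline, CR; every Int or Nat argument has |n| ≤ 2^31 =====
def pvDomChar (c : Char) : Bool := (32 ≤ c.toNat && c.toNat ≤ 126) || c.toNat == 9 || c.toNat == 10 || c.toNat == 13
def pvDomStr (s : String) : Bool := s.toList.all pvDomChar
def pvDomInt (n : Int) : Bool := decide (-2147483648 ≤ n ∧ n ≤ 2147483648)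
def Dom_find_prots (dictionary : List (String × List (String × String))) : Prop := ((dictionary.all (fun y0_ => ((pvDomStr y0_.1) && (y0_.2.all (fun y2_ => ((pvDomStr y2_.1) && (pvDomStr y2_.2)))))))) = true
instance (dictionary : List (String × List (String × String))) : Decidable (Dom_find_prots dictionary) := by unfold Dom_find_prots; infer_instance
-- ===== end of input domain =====

-- B replaces A's per-'M' suffix scan (every 'M' slices the rest of the string and re-searches it for
-- '_', collecting all candidates) by a single left-to-right scan per string that builds the current
-- stop-delimited segment's candidate incrementally and keeps only the running best.

-- ===== PORT A =====
-- literal port of oframe(amino); strings handled as List Char via PySem.Chars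
def oframe (amino : List Char) : List (List Char) :=
  (PySem.List.pyRange 0 (amino.length : Int) 1).foldl (fun oframes i =>
    if PySem.List.pyGetD amino i ' ' = 'M' then  -- amino[i]; i ∈ range(len(amino)), always in range
      let temp := PySem.List.slice amino (some i) none
      let stop := PySem.Chars.find temp ['_']
      if stop ≠ -1 then oframes ++ [PySem.List.slice temp none (some (stop + 1))]
      else oframes ++ [temp]
    else oframes) []

def find_prots (dictionary : List (String × List (String × String))) : List (String × String) :=
  ((PySem.Dict.ofList dictionary).items.foldl (fun prots_dict kv =>
    let frames := PySem.Dict.ofList kv.2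
    -- for f in frames: poss_protein += oframe(frames[f])  (f is a present key, so getD never defaults)
    let poss_protein := frames.keys.foldl (fun acc f => acc ++ oframe ((frames.getD f "").toList)) []
    let r := poss_protein.foldl (fun (bl : List Char × Int) prot =>
      if (prot.length : Int) > bl.2 then (prot, (prot.length : Int)) else bl) ([], 0)
    prots_dict.insert kv.1 (String.ofList r.1)) PySem.Dict.empty).items

-- ===== PORT B =====
-- one step of B's scan: state = (best so far, candidate of the current segment; [] = no candidate)
def scanChar (st : List Char × List Char) (c : Char) : List Char × List Char :=
  let cur := if st.2 ≠ [] then st.2 ++ [c] else if c = 'M' then ['M'] else st.2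
  if c = '_' then ((if cur.length > st.1.length then cur else st.1), []) else (st.1, cur)

def scanAmino (best : List Char) (amino : List Char) : List Char :=
  let r := amino.foldl scanChar (best, [])
  if r.2.length > r.1.length then r.2 else r.1

def find_prots_alt (dictionary : List (String × List (String × String))) : List (String × String) :=
  ((PySem.Dict.ofList dictionary).items.foldl (fun prots_dict kv =>
    let frames := PySem.Dict.ofList kv.2
    let best := frames.values.foldl (fun best amino => scanAmino best amino.toList) []
    prots_dict.insert kv.1 (String.ofList best)) PySem.Dict.empty).items

-- ===== PRECONDITION & SPEC =====
def Spec_find_prots (dictionary : List (String × List (String × String))) (out : List (String × String)) : Prop := out = find_prots_alt dictionary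
instance (dictionary : List (String × List (String × String))) (out : List (String × String)) : Decidable (Spec_find_prots dictionary out) := by unfold Spec_find_prots; infer_instance

-- ===== CLAIM (what is proved, stated in full; the proofs are below) =====
def Claim_equal_find_prots : Prop := ∀ (dictionary : List (String × List (String × String))), Dom_find_prots dictionary → Spec_find_prots dictionary (find_prots dictionary)

-- ===== LEMMAS AND PROOFS =====

-- "keep the longer" step of A's best/max_len loop, with the length component dropped
def astep (b p : List Char) : List Char := if p.length > b.length then p else b

-- the candidate A builds at an 'M': the rest of the string, cut after the first '_' (if any)
def trimSeg : List Char → List Char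
  | [] => []
  | c :: cs => if c = '_' then ['_'] else c :: trimSeg cs

-- the list of candidates oframe produces, structurally
def cands : List Char → List (List Char)
  | [] => []
  | c :: cs => (if c = 'M' then [trimSeg (c :: cs)] else []) ++ cands cs

-- the suffixes of s starting at each 'M'
def msufs : List Char → List (List Char)
  | [] => []
  | c :: cs => (if c = 'M' then [c :: cs] else []) ++ msufs cs

theorem find_eq_of (u : List Char) (m : Nat) (h1 : ['_'] <+: u.drop m)
    (h2 : ∀ i < m, ¬ ['_'] <+: u.drop i) : PySem.Chars.find u ['_'] = (m : Int) := by
  have hin : PySem.Chars.isIn ['_'] u = true :=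
    (PySem.Chars.exists_prefix_drop_iff_isIn _ _).1 ⟨m, h1⟩
  have hnn : 0 ≤ PySem.Chars.find u ['_'] :=
    (PySem.Chars.find_nonneg_iff u ['_']).2 ((PySem.Chars.isIn_iff_infix _ _).1 hin)
  obtain ⟨hpre, hmin⟩ := PySem.Chars.find_spec hnn
  have : (PySem.Chars.find u ['_']).toNat = m := by
    rcases Nat.lt_trichotomy (PySem.Chars.find u ['_']).toNat m with h | h | h
    · exact absurd hpre (h2 _ h)
    · exact h
    · exact absurd h1 (hmin _ h)
  omega

theorem find_us_cons (cs : List Char) : PySem.Chars.find ('_' :: cs) ['_'] = 0 := by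
  have := find_eq_of ('_' :: cs) 0 (by simp) (by omega)
  simpa using this

theorem find_no_us (u : List Char) (h : '_' ∉ u) : PySem.Chars.find u ['_'] = -1 :=
  (PySem.Chars.find_eq_neg_one_iff _ _).2 (by simpa [List.singleton_infix_iff] using h)

theorem find_cons_ne (c : Char) (cs : List Char) (hc : c ≠ '_') (hmem : '_' ∈ cs) :
    PySem.Chars.find (c :: cs) ['_'] = PySem.Chars.find cs ['_'] + 1 := by
  have hnn : 0 ≤ PySem.Chars.find cs ['_'] :=
    (PySem.Chars.find_nonneg_iff cs ['_']).2 ((List.singleton_infix_iff _ _).2 hmem)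
  obtain ⟨hpre, hmin⟩ := PySem.Chars.find_spec hnn
  have := find_eq_of (c :: cs) ((PySem.Chars.find cs ['_']).toNat + 1)
    (by simpa using hpre)
    (by
      intro i hi
      cases i with
      | zero => simpa using fun h => hc h.symm
      | succ j => intro h; exact hmin j (by omega) (by simpa using h))
  rw [this]; omega

theorem trimSeg_no_stop (p : List Char) (h : '_' ∉ p) : trimSeg p = p := by
  induction p with
  | nil => rfl
  | cons c cs ih =>
    have hc : ¬ c = '_' := by intro hh; exact h (by simp [hh])
    simp [trimSeg, hc, ih (by simp_all)]

theorem trimSeg_stop (p t : List Char) (h : '_' ∉ p) :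
    trimSeg (p ++ '_' :: t) = p ++ ['_'] := by
  induction p with
  | nil => simp [trimSeg]
  | cons c cs ih =>
    have hc : ¬ c = '_' := by intro hh; exact h (by simp [hh])
    simp only [List.cons_append, trimSeg]
    rw [if_neg hc, ih (by simp_all)]

-- A's find/slice candidate is trimSeg
theorem trim_eq (u : List Char) :
    (if PySem.Chars.find u ['_'] ≠ -1
      then PySem.List.slice u none (some (PySem.Chars.find u ['_'] + 1)) else u) = trimSeg u := by
  induction u with
  | nil => simp [find_no_us [] (by simp), trimSeg]
  | cons c cs ih =>
    by_cases hc : c = '_'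
    · subst hc
      rw [find_us_cons, if_pos (by norm_num)]
      have h1 : PySem.List.slice ('_' :: cs) none (some ((1 : Nat) : Int)) = List.take 1 ('_' :: cs) :=
        PySem.List.slice_to_natCast _ 1
      simp only [Nat.cast_one] at h1
      simp [h1, trimSeg]
    · by_cases hmem : '_' ∈ cs
      · have hf := find_cons_ne c cs hc hmem
        have hnn : 0 ≤ PySem.Chars.find cs ['_'] :=
          (PySem.Chars.find_nonneg_iff cs ['_']).2 ((List.singleton_infix_iff _ _).2 hmem)
        rw [hf, if_pos (by omega)]
        have hcast : PySem.Chars.find cs ['_'] + 1 + 1 = (((PySem.Chars.find cs ['_']).toNat + 2 : Nat) : Int) := by omega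
        rw [hcast, PySem.List.slice_to_natCast]
        have hne : PySem.Chars.find cs ['_'] ≠ -1 := by omega
        rw [if_pos hne] at ih
        have hcast2 : PySem.Chars.find cs ['_'] + 1 = (((PySem.Chars.find cs ['_']).toNat + 1 : Nat) : Int) := by omega
        rw [hcast2, PySem.List.slice_to_natCast] at ih
        simp only [trimSeg, if_neg hc]
        rw [← ih]
        rfl
      · have hno : '_' ∉ c :: cs := by
          intro hh; rcases List.mem_cons.1 hh with hh | hh
          · exact hc hh.symm
          · exact hmem hh
        rw [find_no_us _ hno, if_neg (by simp), trimSeg_no_stop _ hno]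

-- oframe as a flatMap over Nat indices
theorem oframe_eq_G (s : List Char) :
    oframe s = (List.range s.length).flatMap
      (fun k => if s.getD k ' ' = 'M' then [trimSeg (List.drop k s)] else []) := by
  unfold oframe
  rw [PySem.List.foldl_congr_mem _ _
      (fun oframes i => oframes ++ (if PySem.List.pyGetD s i ' ' = 'M' then
        [if PySem.Chars.find (PySem.List.slice s (some i) none) ['_'] ≠ -1
          then PySem.List.slice (PySem.List.slice s (some i) none) none
            (some (PySem.Chars.find (PySem.List.slice s (some i) none) ['_'] + 1))
          else PySem.List.slice s (some i) none] else [])) _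
      (by
        intro acc i _
        by_cases hM : PySem.List.pyGetD s i ' ' = 'M'
        · simp only [if_pos hM]
          split_ifs <;> simp
        · simp [hM])]
  rw [PySem.List.foldl_append_eq_flatMap]
  rw [PySem.List.pyRange_one]
  rw [List.flatMap_map]
  simp only [List.nil_append, Int.sub_zero, Int.toNat_natCast]
  congr 1
  funext k
  have h1 : (0 : Int) + (k : Int) = ((k : Nat) : Int) := by omega
  rw [h1, PySem.List.pyGetD_natCast, PySem.List.slice_from_natCast]
  rw [trim_eq (List.drop k s)]

theorem oframe_eq_cands (s : List Char) : oframe s = cands s := by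
  rw [oframe_eq_G]
  induction s with
  | nil => rfl
  | cons c cs ih =>
    simp only [List.length_cons, List.range_succ_eq_map, List.flatMap_cons, List.flatMap_map]
    have h2 : (fun a => if (c :: cs).getD (a.succ) ' ' = 'M'
        then [trimSeg (List.drop (a.succ) (c :: cs))] else [])
        = (fun k => if cs.getD k ' ' = 'M' then [trimSeg (List.drop k cs)] else []) := by
      funext a
      simp
    rw [h2, ih]
    simp [cands]

-- pair-collapse of A's (best, max_len) loop
theorem foldl_pair (l : List (List Char)) (b : List Char) :
    l.foldl (fun (bl : List Char × Int) prot =>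
        if (prot.length : Int) > bl.2 then (prot, (prot.length : Int)) else bl) (b, (b.length : Int))
      = (l.foldl astep b, ((l.foldl astep b).length : Int)) := by
  induction l generalizing b with
  | nil => rfl
  | cons p l ih =>
    simp only [List.foldl_cons]
    by_cases h : p.length > b.length
    · rw [if_pos (by exact_mod_cast h), astep, if_pos h]; exact ih p
    · rw [if_neg (by exact_mod_cast h), astep, if_neg h]; exact ih b

-- folding astep over an appended-up list = per-piece folds
theorem foldl_flatten {α : Type} (l : List α) (g : α → List (List Char))
    (acc : List (List Char)) (b : List Char) :
    (l.foldl (fun a x => a ++ g x) acc).foldl astep b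
      = l.foldl (fun bb x => (g x).foldl astep bb) (acc.foldl astep b) := by
  induction l generalizing acc b with
  | nil => rfl
  | cons x l ih =>
    simp only [List.foldl_cons]
    rw [ih, List.foldl_append]

theorem astep_len (b c : List Char) : c.length ≤ (astep b c).length := by
  unfold astep; split_ifs with h <;> omega

theorem foldl_absorb (l : List (List Char)) (b : List Char)
    (h : ∀ p ∈ l, p.length ≤ b.length) : l.foldl astep b = b := by
  induction l with
  | nil => rfl
  | cons p l ih =>
    simp only [List.foldl_cons]
    rw [astep, if_neg (by have := h p (by simp); omega)]
    exact ih (fun q hq => h q (by simp [hq]))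

theorem msufs_len (s : List Char) : ∀ x ∈ msufs s, x.length ≤ s.length := by
  induction s with
  | nil => simp [msufs]
  | cons c cs ih =>
    intro x hx
    simp only [msufs, List.mem_append] at hx
    rcases hx with hx | hx
    · split_ifs at hx <;> simp_all
    · have := ih x hx; simp; omega

theorem msufs_no_M (s : List Char) (h : 'M' ∉ s) : msufs s = [] := by
  induction s with
  | nil => rfl
  | cons c cs ih =>
    have hc : ¬ c = 'M' := by intro hh; exact h (by simp [hh])
    simp [msufs, hc, ih (by simp_all)]

theorem msufs_first (q r : List Char) (hq : 'M' ∉ q) :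
    msufs (q ++ 'M' :: r) = ('M' :: r) :: msufs r := by
  induction q with
  | nil => simp [msufs]
  | cons c q ih =>
    have hc : ¬ c = 'M' := by intro hh; exact hq (by simp [hh])
    simp only [List.cons_append, msufs]
    rw [ih (by simp_all), if_neg hc]
    simp

theorem cands_no_stop (s : List Char) (h : '_' ∉ s) : cands s = msufs s := by
  induction s with
  | nil => rfl
  | cons c cs ih =>
    simp only [cands, msufs]
    rw [ih (by simp_all), trimSeg_no_stop _ h]

theorem cands_stop (p t : List Char) (h : '_' ∉ p) :
    cands (p ++ '_' :: t) = (msufs p).map (· ++ ['_']) ++ cands t := by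
  induction p with
  | nil => simp [cands, msufs]
  | cons c cs ih =>
    have hc : ¬ c = '_' := by intro hh; exact h (by simp [hh])
    simp only [List.cons_append, cands, msufs]
    rw [ih (by simp_all)]
    by_cases hM : c = 'M'
    · subst hM
      rw [if_pos rfl, if_pos rfl,
        show 'M' :: (cs ++ '_' :: t) = ('M' :: cs) ++ '_' :: t from rfl,
        trimSeg_stop _ _ h]
      simp
    · rw [if_neg hM, if_neg hM]; simp

-- first-occurrence split helper
theorem split_first {a : Char} {s : List Char} (h : a ∈ s) :
    ∃ p t, s = p ++ a :: t ∧ a ∉ p := by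
  induction s with
  | nil => cases h
  | cons c cs ih =>
    by_cases hc : c = a
    · exact ⟨[], cs, by simp [hc], by simp⟩
    · have h' : a ∈ cs := by
        rcases List.mem_cons.1 h with hh | hh
        · exact absurd hh.symm hc
        · exact hh
      obtain ⟨p, t, rfl, hp⟩ := ih h'
      refine ⟨c :: p, t, by simp, ?_⟩
      intro hh
      rcases List.mem_cons.1 hh with hh | hh
      · exact hc hh.symm
      · exact hp hh

-- B's scan over a prefix with no 'M' and no '_' does nothing
theorem scan_skip (p : List Char) (hu : '_' ∉ p) (hm : 'M' ∉ p) (b : List Char) :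
    p.foldl scanChar (b, []) = (b, []) := by
  induction p with
  | nil => rfl
  | cons c cs ih =>
    simp only [List.foldl_cons]
    have hcM : ¬ c = 'M' := fun hh => hm (by simp [hh])
    have hcU : ¬ c = '_' := fun hh => hu (by simp [hh])
    have h1 : scanChar (b, []) c = (b, []) := by
      simp [scanChar, hcM, hcU]
    rw [h1]
    exact ih (fun hh => hu (by simp [hh])) (fun hh => hm (by simp [hh]))

-- B's scan over a stop-free piece with an open candidate appends it wholesale
theorem scan_accum (p : List Char) (hu : '_' ∉ p) (b cur : List Char) (hcur : cur ≠ []) :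
    p.foldl scanChar (b, cur) = (b, cur ++ p) := by
  induction p generalizing cur with
  | nil => simp
  | cons c cs ih =>
    simp only [List.foldl_cons]
    have hcU : ¬ c = '_' := fun hh => hu (by simp [hh])
    have h1 : scanChar (b, cur) c = (b, cur ++ [c]) := by
      simp [scanChar, hcur, hcU]
    rw [h1, ih (fun hh => hu (by simp [hh])) _ (by simp)]
    simp

theorem scanChar_M (b : List Char) : scanChar (b, []) 'M' = (b, ['M']) := by
  simp [scanChar]

theorem scanChar_stop (b cur : List Char) (hcur : cur ≠ []) :
    scanChar (b, cur) '_' = (astep b (cur ++ ['_']), []) := by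
  simp only [scanChar, astep]
  simp [hcur]

theorem scanChar_stop_empty (b : List Char) : scanChar (b, ([] : List Char)) '_' = (b, []) := by
  simp [scanChar]

-- the per-string core: B's scan = A's candidate fold
theorem scan_eq_cands : ∀ (s b : List Char), scanAmino b s = (cands s).foldl astep b := by
  suffices H : ∀ (n : Nat) (s b : List Char), s.length ≤ n →
      scanAmino b s = (cands s).foldl astep b by
    exact fun s b => H s.length s b le_rfl
  intro n
  induction n with
  | zero =>
    intro s b hs
    have : s = [] := List.eq_nil_of_length_eq_zero (by omega)
    subst this
    simp [scanAmino, cands]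
  | succ n ih =>
    intro s b hs
    by_cases hstop : '_' ∈ s
    · obtain ⟨p, t, rfl, hp⟩ := split_first hstop
      by_cases hm : 'M' ∈ p
      · obtain ⟨q, r, rfl, hq⟩ := split_first hm
        have hq_ : '_' ∉ q := fun hh => hp (by simp [hh])
        have hr_ : '_' ∉ r := fun hh => hp (by simp [hh])
        have hLHS : scanAmino b ((q ++ 'M' :: r) ++ '_' :: t)
            = scanAmino (astep b ('M' :: (r ++ ['_']))) t := by
          unfold scanAmino
          simp only [List.append_assoc, List.cons_append, List.foldl_append, List.foldl_cons]
          rw [scan_skip q hq_ hq b, scanChar_M, scan_accum r hr_ b ['M'] (by simp)]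
          have : ('M' :: r) ≠ [] := by simp
          rw [show (['M'] ++ r) = 'M' :: r from rfl, scanChar_stop b ('M' :: r) this]
          rfl
        have hRHS : (cands ((q ++ 'M' :: r) ++ '_' :: t)).foldl astep b
            = (cands t).foldl astep (astep b ('M' :: (r ++ ['_']))) := by
          rw [cands_stop _ _ hp, msufs_first q r hq]
          simp only [List.map_cons, List.foldl_append, List.foldl_cons, List.cons_append]
          congr 1
          apply foldl_absorb
          intro x hx
          simp only [List.mem_map] at hx
          obtain ⟨y, hy, rfl⟩ := hx
          have h1 := msufs_len r y hy
          have h2 := astep_len b ('M' :: (r ++ ['_']))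
          simp only [List.length_append, List.length_cons] at *
          omega
        rw [hLHS, hRHS]
        apply ih
        have : ((q ++ 'M' :: r) ++ '_' :: t).length = q.length + r.length + t.length + 2 := by
          simp; omega
        omega
      · have hLHS : scanAmino b (p ++ '_' :: t) = scanAmino b t := by
          unfold scanAmino
          simp only [List.foldl_append, List.foldl_cons]
          rw [scan_skip p hp hm b, scanChar_stop_empty]
        have hRHS : (cands (p ++ '_' :: t)).foldl astep b = (cands t).foldl astep b := by
          rw [cands_stop _ _ hp, msufs_no_M p hm]
          simp
        rw [hLHS, hRHS]
        apply ih
        have : (p ++ '_' :: t).length = p.length + t.length + 1 := by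
          simp; omega
        omega
    · by_cases hm : 'M' ∈ s
      · obtain ⟨q, r, rfl, hq⟩ := split_first hm
        have hq_ : '_' ∉ q := fun hh => hstop (by simp [hh])
        have hr_ : '_' ∉ r := fun hh => hstop (by simp [hh])
        have hLHS : scanAmino b (q ++ 'M' :: r) = astep b ('M' :: r) := by
          unfold scanAmino
          simp only [List.foldl_append, List.foldl_cons]
          rw [scan_skip q hq_ hq b, scanChar_M, scan_accum r hr_ b ['M'] (by simp)]
          simp [astep]
        rw [hLHS, cands_no_stop _ hstop, msufs_first q r hq]
        simp only [List.foldl_cons]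
        rw [foldl_absorb]
        intro x hx
        have h1 := msufs_len r x hx
        have h2 := astep_len b ('M' :: r)
        simp only [List.length_cons] at *
        omega
      · have hLHS : scanAmino b s = b := by
          unfold scanAmino
          rw [scan_skip s hstop hm b]
          simp
        rw [hLHS, cands_no_stop _ hstop, msufs_no_M s hm]
        rfl

-- per-key equality of the two dict-building steps
theorem step_eq (prots : PySem.Dict String String) (kv : String × List (String × String)) :
    (let frames := PySem.Dict.ofList kv.2
     let poss_protein := frames.keys.foldl (fun acc f => acc ++ oframe ((frames.getD f "").toList)) []
     let r := poss_protein.foldl (fun (bl : List Char × Int) prot =>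
       if (prot.length : Int) > bl.2 then (prot, (prot.length : Int)) else bl) ([], 0)
     prots.insert kv.1 (String.ofList r.1))
    = (let frames := PySem.Dict.ofList kv.2
       let best := frames.values.foldl (fun best amino => scanAmino best amino.toList) []
       prots.insert kv.1 (String.ofList best)) := by
  simp only []
  congr 1
  have h0 : (([] : List Char).length : Int) = 0 := by simp
  rw [← h0, foldl_pair]
  simp only []
  rw [foldl_flatten]
  simp only [List.foldl_nil]
  rw [PySem.Dict.values_eq_map_keys _ (PySem.Dict.nodup_keys_ofList kv.2) ""]
  rw [List.foldl_map]
  congr 1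
  apply PySem.List.foldl_congr_mem
  intro acc f _
  rw [oframe_eq_cands, scan_eq_cands]

-- ===== VERDICT (by name: the statement is the Claim_ definition above) =====
theorem find_prots_spec : Claim_equal_find_prots := by
  intro dictionary _
  unfold Spec_find_prots find_prots find_prots_alt
  congr 1
  apply PySem.List.foldl_congr_mem
  intro acc kv _
  exact step_eq acc kv
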